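-- pv_equiv track=rewrite | github.com/ProjectQ-Framework/ProjectQ | projectq/setups/decompositions/diagonal_gate.py | _count_trailing_zero_bits
-- ===== SOURCE A (Python) =====
-- def _count_trailing_zero_bits(v):
--     assert(v > 0)
--     v = (v ^ (v - 1)) >> 1;
--     c = 0
--     while(v):
--         v >>= 1;
--         c += 1
--     return c
-- ===== SOURCE B (Python) =====
-- def _count_trailing_zero_bits(v):
--     assert(v > 0)
--     return (v & -v).bit_length() - 1
-- ===== Notes on version B (the rewrite author's own statement) =====
-- stated objective: idiomatic
-- what changed: Replaces the mask-then-shift-count loop with a loop-free closed form: isolate the lowest set bit arithmetically (v & -v) and read off its index with the bit_length builtin.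
import Mathlib
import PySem

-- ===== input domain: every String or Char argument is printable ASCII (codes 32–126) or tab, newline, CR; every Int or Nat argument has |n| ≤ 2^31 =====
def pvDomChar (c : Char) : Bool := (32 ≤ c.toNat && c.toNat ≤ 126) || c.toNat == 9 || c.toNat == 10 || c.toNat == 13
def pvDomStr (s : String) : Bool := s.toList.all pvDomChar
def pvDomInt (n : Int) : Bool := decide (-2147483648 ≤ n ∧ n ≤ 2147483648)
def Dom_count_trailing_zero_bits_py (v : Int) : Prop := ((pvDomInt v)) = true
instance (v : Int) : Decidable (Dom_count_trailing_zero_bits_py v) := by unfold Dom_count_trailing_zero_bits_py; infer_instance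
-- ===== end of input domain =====

-- B replaces A's mask-then-shift-count loop by the closed form (v & -v).bit_length() - 1 (idiomatic, loop-free).

-- ===== PORT A =====
-- 'while v: v >>= 1; c += 1' over the loop state (v, c); for v > 0 the loop value
-- (v ^ (v-1)) >> 1 is nonnegative, so tracking it as a Nat is exact on Pre_.
def ctzLoopA : Nat → Nat → Nat
  | 0, c => c
  | n + 1, c => ctzLoopA ((n + 1) / 2) (c + 1)
  termination_by n _ => n
  decreasing_by omega

def count_trailing_zero_bits_py (v : Int) : Int :=
  -- assert(v > 0): inputs with v ≤ 0 raise AssertionError and are excluded by Pre_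
  let v1 := (Int.xor v (v - 1)).shiftRight 1   -- v = (v ^ (v - 1)) >> 1
  (ctzLoopA v1.toNat 0 : Int)

-- ===== PORT B =====
-- return (v & -v).bit_length() - 1 ; bit_length of a nonnegative int is Nat.size.
def count_trailing_zero_bits_py_alt (v : Int) : Int :=
  -- assert(v > 0): same AssertionError domain, excluded by Pre_
  ((Int.land v (-v)).toNat.size : Int) - 1

-- ===== PRECONDITION & SPEC =====
-- A (and B) raise AssertionError exactly when v ≤ 0.
def Pre_count_trailing_zero_bits_py (v : Int) : Prop := 0 < v
instance (v : Int) : Decidable (Pre_count_trailing_zero_bits_py v) := by unfold Pre_count_trailing_zero_bits_py; infer_instance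
def pvWitness_count_trailing_zero_bits_py : Int := (12)
def Spec_count_trailing_zero_bits_py (v : Int) (out : Int) : Prop := out = count_trailing_zero_bits_py_alt v
instance (v : Int) (out : Int) : Decidable (Spec_count_trailing_zero_bits_py v out) := by unfold Spec_count_trailing_zero_bits_py; infer_instance

-- ===== CLAIM (what is proved, stated in full; the proofs are below) =====
def Claim_equal_count_trailing_zero_bits_py : Prop := ∀ (v : Int), Dom_count_trailing_zero_bits_py v → Pre_count_trailing_zero_bits_py v → Spec_count_trailing_zero_bits_py v (count_trailing_zero_bits_py v)

-- ===== LEMMAS AND PROOFS =====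

theorem two_mul_xor_two_mul_add_one (x y : Nat) : (2*x) ^^^ (2*y+1) = 2*(x ^^^ y) + 1 := by
  apply Nat.eq_of_testBit_eq
  intro i
  cases i with
  | zero => rw [Nat.testBit_zero, Nat.testBit_zero, Nat.xor_mod_two_eq]; simp
  | succ j =>
    rw [Nat.testBit_xor, Nat.testBit_succ, Nat.testBit_succ, Nat.testBit_succ]
    have h1 : 2*x/2 = x := by omega
    have h2 : (2*y+1)/2 = y := by omega
    have h3 : (2*(x ^^^ y)+1)/2 = x ^^^ y := by omega
    rw [h1, h2, h3, Nat.testBit_xor]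
theorem xor_succ_self (x : Nat) : (2*x+1) ^^^ (2*x) = 1 := by
  apply Nat.eq_of_testBit_eq
  intro i
  cases i with
  | zero => rw [Nat.testBit_zero, Nat.testBit_zero, Nat.xor_mod_two_eq]; simp
  | succ j =>
    rw [Nat.testBit_xor, Nat.testBit_succ, Nat.testBit_succ, Nat.testBit_succ]
    have h1 : (2*x+1)/2 = x := by omega
    have h2 : 2*x/2 = x := by omega
    have h3 : (1:Nat)/2 = 0 := by omega
    rw [h1, h2, h3]
    simp
theorem ldiff_two_mul (x y : Nat) : Nat.ldiff (2*x) (2*y+1) = 2 * Nat.ldiff x y := by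
  apply Nat.eq_of_testBit_eq
  intro i
  cases i with
  | zero =>
    rw [Nat.testBit_ldiff, Nat.testBit_zero, Nat.testBit_zero, Nat.testBit_zero]
    simp
  | succ j =>
    rw [Nat.testBit_ldiff, Nat.testBit_succ, Nat.testBit_succ, Nat.testBit_succ]
    have h1 : 2*x/2 = x := by omega
    have h2 : (2*y+1)/2 = y := by omega
    have h3 : 2*Nat.ldiff x y/2 = Nat.ldiff x y := by omega
    rw [h1, h2, h3, Nat.testBit_ldiff]
theorem ldiff_succ_self (x : Nat) : Nat.ldiff (2*x+1) (2*x) = 1 := by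
  apply Nat.eq_of_testBit_eq
  intro i
  cases i with
  | zero =>
    rw [Nat.testBit_ldiff, Nat.testBit_zero, Nat.testBit_zero, Nat.testBit_zero]
    simp
  | succ j =>
    rw [Nat.testBit_ldiff, Nat.testBit_succ, Nat.testBit_succ, Nat.testBit_succ]
    have h1 : (2*x+1)/2 = x := by omega
    have h2 : 2*x/2 = x := by omega
    have h3 : (1:Nat)/2 = 0 := by omega
    rw [h1, h2, h3]
    simp
theorem size_div2_succ (n : Nat) (h : n ≠ 0) : Nat.size n = Nat.size (n / 2) + 1 := by
  apply Nat.le_antisymm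
  · apply Nat.size_le.mpr
    have := Nat.lt_size_self (n / 2)
    rw [pow_succ]
    omega
  · apply Nat.lt_size.mpr
    rcases Nat.eq_zero_or_pos (n / 2) with h0 | h0
    · simp [h0, Nat.size_zero]; omega
    · have hs : 0 < Nat.size (n / 2) := Nat.size_pos.mpr h0
      have : ¬ (n / 2 < 2 ^ (Nat.size (n / 2) - 1)) := by
        intro hc
        have := Nat.size_le.mpr hc
        omega
      have h4 : 2 ^ (Nat.size (n / 2) - 1) ≤ n / 2 := by omega
      have h5 : 2 ^ (Nat.size (n/2) - 1 + 1) = 2 * 2 ^ (Nat.size (n/2) - 1) := by rw [pow_succ]; ring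
      have : Nat.size (n/2) - 1 + 1 = Nat.size (n/2) := by omega
      rw [← this, h5]
      omega

theorem ctzLoopA_eq_size (n : Nat) : ∀ c, ctzLoopA n c = Nat.size n + c := by
  induction n using Nat.strong_induction_on with
  | _ n ih =>
    intro c
    match n with
    | 0 => simp [ctzLoopA]
    | m + 1 =>
      rw [ctzLoopA, ih ((m + 1) / 2) (by omega), size_div2_succ (m + 1) (by omega)]
      omega

theorem xor_pred_odd (n : Nat) (h : n % 2 = 1) : n ^^^ (n - 1) = 1 := by
  obtain ⟨a, rfl⟩ : ∃ a, n = 2 * a + 1 := ⟨n / 2, by omega⟩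
  rw [show 2 * a + 1 - 1 = 2 * a from by omega]
  exact xor_succ_self a

theorem xor_pred_even (n : Nat) (h0 : 0 < n) (h : n % 2 = 0) :
    n ^^^ (n - 1) = 2 * ((n / 2) ^^^ (n / 2 - 1)) + 1 := by
  obtain ⟨a, rfl⟩ : ∃ a, n = 2 * a := ⟨n / 2, by omega⟩
  rw [show 2 * a / 2 = a from by omega, show 2 * a - 1 = 2 * (a - 1) + 1 from by omega]
  exact two_mul_xor_two_mul_add_one a (a - 1)

theorem ldiff_pred_odd (n : Nat) (h : n % 2 = 1) : Nat.ldiff n (n - 1) = 1 := by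
  obtain ⟨a, rfl⟩ : ∃ a, n = 2 * a + 1 := ⟨n / 2, by omega⟩
  rw [show 2 * a + 1 - 1 = 2 * a from by omega]
  exact ldiff_succ_self a

theorem ldiff_pred_even (n : Nat) (h0 : 0 < n) (h : n % 2 = 0) :
    Nat.ldiff n (n - 1) = 2 * Nat.ldiff (n / 2) (n / 2 - 1) := by
  obtain ⟨a, rfl⟩ : ∃ a, n = 2 * a := ⟨n / 2, by omega⟩
  rw [show 2 * a / 2 = a from by omega, show 2 * a - 1 = 2 * (a - 1) + 1 from by omega]
  exact ldiff_two_mul a (a - 1)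

theorem ldiff_pred_pos (n : Nat) (h : 0 < n) : 0 < Nat.ldiff n (n - 1) := by
  induction n using Nat.strong_induction_on with
  | _ n ih =>
    rcases Nat.even_or_odd n with he | ho
    · have he2 := Nat.even_iff.mp he
      rw [ldiff_pred_even n h he2]
      have := ih (n / 2) (by omega) (by omega)
      omega
    · rw [ldiff_pred_odd n (Nat.odd_iff.mp ho)]; omega

theorem xor_pred_odd' (n : Nat) (h : 0 < n) : (n ^^^ (n - 1)) % 2 = 1 := by
  rcases Nat.even_or_odd n with he | ho
  · rw [xor_pred_even n h (Nat.even_iff.mp he)]; omega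
  · rw [xor_pred_odd n (Nat.odd_iff.mp ho)]

theorem key_size (n : Nat) (h : 0 < n) :
    Nat.size ((n ^^^ (n - 1)) / 2) + 1 = Nat.size (Nat.ldiff n (n - 1)) := by
  induction n using Nat.strong_induction_on with
  | _ n ih =>
    rcases Nat.even_or_odd n with he | ho
    · have he2 := Nat.even_iff.mp he
      rw [xor_pred_even n h he2, ldiff_pred_even n h he2]
      have hpos : 0 < n / 2 := by omega
      have hih := ih (n / 2) (by omega) hpos
      have hx : (2 * ((n / 2) ^^^ (n / 2 - 1)) + 1) / 2 = (n / 2) ^^^ (n / 2 - 1) := by omega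
      rw [hx]
      have hxo : ((n / 2) ^^^ (n / 2 - 1)) % 2 = 1 := xor_pred_odd' (n / 2) hpos
      have hxs : Nat.size ((n / 2) ^^^ (n / 2 - 1)) =
          Nat.size (((n / 2) ^^^ (n / 2 - 1)) / 2) + 1 :=
        size_div2_succ _ (by omega)
      have hlp : 0 < Nat.ldiff (n / 2) (n / 2 - 1) := ldiff_pred_pos (n / 2) hpos
      have hls : Nat.size (2 * Nat.ldiff (n / 2) (n / 2 - 1)) =
          Nat.size (2 * Nat.ldiff (n / 2) (n / 2 - 1) / 2) + 1 :=
        size_div2_succ _ (by omega)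
      have h2 : 2 * Nat.ldiff (n / 2) (n / 2 - 1) / 2 = Nat.ldiff (n / 2) (n / 2 - 1) := by omega
      rw [hls, h2, hxs]
      omega
    · have ho2 := Nat.odd_iff.mp ho
      rw [xor_pred_odd n ho2, ldiff_pred_odd n ho2]
      simp [Nat.size_zero, Nat.size_one]

theorem neg_natCast_eq_negSucc (n : Nat) (h : 0 < n) : -(n : Int) = Int.negSucc (n - 1) := by
  cases n with
  | zero => omega
  | succ k => simp [Int.negSucc_eq]

-- ===== VERDICT (by name: the statement is the Claim_ definition above) =====
theorem count_trailing_zero_bits_py_spec : Claim_equal_count_trailing_zero_bits_py := by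
  intro v _ hpre
  unfold Spec_count_trailing_zero_bits_py
  unfold Pre_count_trailing_zero_bits_py at hpre
  obtain ⟨n, rfl⟩ : ∃ n : Nat, v = (n : Int) := ⟨v.toNat, (Int.toNat_of_nonneg (by omega)).symm⟩
  have hn : 0 < n := by exact_mod_cast hpre
  unfold count_trailing_zero_bits_py count_trailing_zero_bits_py_alt
  have hc1 : ((n : Int) - 1) = ((n - 1 : Nat) : Int) := by omega
  rw [hc1]
  have hx : Int.xor (n : Int) ((n - 1 : Nat) : Int) = ((n ^^^ (n - 1) : Nat) : Int) := rfl
  rw [hx]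
  have hs : ((( n ^^^ (n - 1) : Nat) : Int)).shiftRight 1 = (((n ^^^ (n - 1)) / 2 : Nat) : Int) := rfl
  rw [hs]
  rw [neg_natCast_eq_negSucc n hn]
  have hl : Int.land (n : Int) (Int.negSucc (n - 1)) = ((Nat.ldiff n (n - 1) : Nat) : Int) := rfl
  rw [hl]
  simp only [Int.toNat_natCast]
  rw [ctzLoopA_eq_size]
  have := key_size n hn
  omega
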